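-- pv_equiv track=rewrite | github.com/jacobparish/aoc-python-utils | lib/geometry1d.py | size_of_interval_union
-- ===== SOURCE A (Python) =====
-- def size_of_interval_union(intervals: list[tuple[int, int]]) -> int:
--     """
--     Compute total size of a list of intervals, each of which is assumed to include its
--     endpoints. For instance, the intervals in [(-1, 2), (6, 7), (5, 10), (9, 11)]
--     contain 11 total elements: -1, 0, 1, 2, 5, 6, 7, 8, 9, 10, 11.
--     """
--     intervals = sorted(intervals)
--     bprev = -float("inf")
--     size = 0
--     for a, b in intervals:
--         if bprev < a:
--             size += b + 1 - a
--             bprev = b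
--         elif bprev < b:
--             size += b - bprev
--             bprev = b
--     return size
-- ===== SOURCE B (Python) =====
-- def size_of_interval_union(intervals: list[tuple[int, int]]) -> int:
--     # Prefix-max formulation: pair each sorted interval with the maximum right
--     # endpoint among all earlier intervals, then sum independent contributions.
--     ivs = sorted(intervals)
--     maxes = []
--     m = None
--     for _, b in ivs:
--         maxes.append(m)
--         m = b if m is None else max(m, b)
--     return sum(b + 1 - a if m is None or m < a else max(b - m, 0)
--                for (a, b), m in zip(ivs, maxes))
-- ===== Notes on version B (the rewrite author's own statement) =====
-- stated objective: alternative
-- what changed: B replaces A's branch-dependent sweep state bprev (which is updated only inside two of the three branches and can even decrease on reversed intervals) by the unconditional prefix maximum of all earlier right endpoints, computed in a separate scan; each interval's contribution is then a pure function of the interval and its prefix max, summed independently - the equivalence of the two state notions is the non-trivial content of the proof.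
import Mathlib
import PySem

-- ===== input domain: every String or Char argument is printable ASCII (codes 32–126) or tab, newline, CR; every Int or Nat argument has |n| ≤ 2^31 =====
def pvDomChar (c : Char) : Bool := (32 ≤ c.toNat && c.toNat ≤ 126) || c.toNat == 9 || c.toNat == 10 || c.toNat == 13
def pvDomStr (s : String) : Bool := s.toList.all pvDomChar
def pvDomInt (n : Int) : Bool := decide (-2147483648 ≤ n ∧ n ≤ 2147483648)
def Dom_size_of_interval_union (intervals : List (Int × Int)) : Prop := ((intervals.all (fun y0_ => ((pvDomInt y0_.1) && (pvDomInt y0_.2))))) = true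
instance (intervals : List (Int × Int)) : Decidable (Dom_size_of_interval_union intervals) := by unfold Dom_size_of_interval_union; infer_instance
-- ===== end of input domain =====

-- B replaces A's branch-dependent sweep state bprev by the unconditional prefix
-- maximum of earlier right endpoints, computed in a separate scan, and sums
-- pure per-interval contributions (alternative decomposition, same cost).

-- ===== PORT A =====
-- bprev : Option Int, none = -inf (Python's initial -float("inf"); -inf < x for every int)
def pvSizeLoopA : List (Int × Int) → Option Int → Int → Int
  | [], _, size => size
  | (a, b) :: rest, none, size => pvSizeLoopA rest (some b) (size + (b + 1 - a))
  | (a, b) :: rest, some p, size =>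
    if p < a then pvSizeLoopA rest (some b) (size + (b + 1 - a))
    else if p < b then pvSizeLoopA rest (some b) (size + (b - p))
    else pvSizeLoopA rest (some p) size

def size_of_interval_union (intervals : List (Int × Int)) : Int :=
  pvSizeLoopA (PySem.List.sorted2 intervals Prod.fst Prod.snd) none 0

-- ===== PORT B =====
-- maxes[i] = max right endpoint over ivs[:i] (none for i = 0), built by the first scan
def pvPrefixMaxes : List (Int × Int) → Option Int → List (Option Int)
  | [], _ => []
  | (_, b) :: rest, m =>
    m :: pvPrefixMaxes rest (some (match m with | none => b | some m0 => max m0 b))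

-- the pure per-interval summand of B's final sum-comprehension
def pvContribB (a b : Int) (m : Option Int) : Int :=
  match m with
  | none => b + 1 - a
  | some mv => if mv < a then b + 1 - a else max (b - mv) 0

def size_of_interval_union_alt (intervals : List (Int × Int)) : Int :=
  let ivs := PySem.List.sorted2 intervals Prod.fst Prod.snd
  ((ivs.zip (pvPrefixMaxes ivs none)).map (fun q => pvContribB q.1.1 q.1.2 q.2)).sum

-- ===== PRECONDITION & SPEC =====
def Spec_size_of_interval_union (intervals : List (Int × Int)) (out : Int) : Prop := out = size_of_interval_union_alt intervals
instance (intervals : List (Int × Int)) (out : Int) : Decidable (Spec_size_of_interval_union intervals out) := by unfold Spec_size_of_interval_union; infer_instance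

-- ===== CLAIM (what is proved, stated in full; the proofs are below) =====
def Claim_equal_size_of_interval_union : Prop := ∀ (intervals : List (Int × Int)), Dom_size_of_interval_union intervals → Spec_size_of_interval_union intervals (size_of_interval_union intervals)

-- ===== LEMMAS AND PROOFS =====

-- Relation between A's state p (bprev) and B's state m (prefix max): either equal,
-- or p ≤ m and m is strictly below every first component still to come.
def pvInv (p m : Option Int) (l : List (Int × Int)) : Prop :=
  p = m ∨ ∃ pb mv, p = some pb ∧ m = some mv ∧ pb ≤ mv ∧ ∀ q ∈ l, mv < q.1

lemma pv_main (l : List (Int × Int)) : ∀ (p m : Option Int) (s : Int),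
    l.Pairwise (fun x y => x.1 ≤ y.1) → pvInv p m l →
    pvSizeLoopA l p s
      = s + ((l.zip (pvPrefixMaxes l m)).map (fun q => pvContribB q.1.1 q.1.2 q.2)).sum := by
  induction l with
  | nil => intro p m s _ _; simp [pvSizeLoopA, pvPrefixMaxes]
  | cons hd rest ih =>
    intro p m s hsort hinv
    obtain ⟨a, b⟩ := hd
    have hsr : rest.Pairwise (fun x y => x.1 ≤ y.1) := hsort.of_cons
    have hhd : ∀ q ∈ rest, a ≤ q.1 := fun q hq => List.rel_of_pairwise_cons hsort hq
    rcases hinv with heq | ⟨pb, mv, hp, hm, hle, hfut⟩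
    · subst heq
      cases p with
      | none =>
        simp only [pvSizeLoopA, pvPrefixMaxes, List.zip_cons_cons, List.map_cons,
          List.sum_cons]
        rw [ih (some b) (some b) _ hsr (Or.inl rfl)]
        simp only [pvContribB]
        ring
      | some v =>
        by_cases h1 : v < a
        · by_cases hvb : v ≤ b
          · have hmax : max v b = b := by omega
            simp only [pvSizeLoopA, pvPrefixMaxes, List.zip_cons_cons, List.map_cons,
              List.sum_cons, if_pos h1, hmax]
            rw [ih (some b) (some b) _ hsr (Or.inl rfl)]
            simp only [pvContribB, if_pos h1]
            ring
          · have hmax : max v b = v := by omega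
            simp only [pvSizeLoopA, pvPrefixMaxes, List.zip_cons_cons, List.map_cons,
              List.sum_cons, if_pos h1, hmax]
            rw [ih (some b) (some v) _ hsr
              (Or.inr ⟨b, v, rfl, rfl, by omega, fun q hq => lt_of_lt_of_le h1 (hhd q hq)⟩)]
            simp only [pvContribB, if_pos h1]
            ring
        · by_cases h2 : v < b
          · have hmax : max v b = b := by omega
            have hcontrib : max (b - v) 0 = b - v := by omega
            simp only [pvSizeLoopA, pvPrefixMaxes, List.zip_cons_cons, List.map_cons,
              List.sum_cons, if_neg h1, if_pos h2, hmax]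
            rw [ih (some b) (some b) _ hsr (Or.inl rfl)]
            simp only [pvContribB]
            rw [if_neg h1, hcontrib]
            ring
          · have hmax : max v b = v := by omega
            have hcontrib : max (b - v) 0 = 0 := by omega
            simp only [pvSizeLoopA, pvPrefixMaxes, List.zip_cons_cons, List.map_cons,
              List.sum_cons, if_neg h1, if_neg h2, hmax]
            rw [ih (some v) (some v) _ hsr (Or.inl rfl)]
            simp only [pvContribB]
            rw [if_neg h1, hcontrib]
            ring
    · subst hp; subst hm
      have hma : mv < a := hfut (a, b) (List.mem_cons_self)
      have h1 : pb < a := lt_of_le_of_lt hle hma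
      by_cases hvb : mv ≤ b
      · have hmax : max mv b = b := by omega
        simp only [pvSizeLoopA, pvPrefixMaxes, List.zip_cons_cons, List.map_cons,
          List.sum_cons, if_pos h1, hmax]
        rw [ih (some b) (some b) _ hsr (Or.inl rfl)]
        simp only [pvContribB, if_pos hma]
        ring
      · have hmax : max mv b = mv := by omega
        simp only [pvSizeLoopA, pvPrefixMaxes, List.zip_cons_cons, List.map_cons,
          List.sum_cons, if_pos h1, hmax]
        rw [ih (some b) (some mv) _ hsr
          (Or.inr ⟨b, mv, rfl, rfl, by omega, fun q hq => hfut q (List.mem_cons_of_mem _ hq)⟩)]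
        simp only [pvContribB, if_pos hma]
        ring

-- the lexicographic "before" predicate used by PySem.List.sorted2 with keys fst, snd
def pvBeforeLex (x y : Int × Int) : Bool :=
  decide (x.1 < y.1) || (!decide (y.1 < x.1) && decide (x.2 < y.2))

lemma pv_insertBy_pairwise (x : Int × Int) (l : List (Int × Int))
    (h : l.Pairwise (fun u v : Int × Int => u.1 ≤ v.1)) :
    (PySem.List.insertBy pvBeforeLex x l).Pairwise (fun u v : Int × Int => u.1 ≤ v.1) := by
  induction l with
  | nil => simp [PySem.List.insertBy]
  | cons y ys ih =>
    by_cases hb : pvBeforeLex x y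
    · have hxy : x.1 ≤ y.1 := by
        simp only [pvBeforeLex, Bool.or_eq_true, Bool.and_eq_true, decide_eq_true_eq,
          Bool.not_eq_true', decide_eq_false_iff_not] at hb
        omega
      have : (PySem.List.insertBy pvBeforeLex x (y :: ys)) = x :: y :: ys := by
        simp [PySem.List.insertBy, hb]
      rw [this]
      exact List.Pairwise.cons
        (fun z hz => by
          rcases List.mem_cons.mp hz with hz | hz
          · subst hz; exact hxy
          · exact le_trans hxy (List.rel_of_pairwise_cons h hz)) h
    · have hyx : y.1 ≤ x.1 := by
        simp only [pvBeforeLex, Bool.or_eq_true, Bool.and_eq_true, decide_eq_true_eq,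
          Bool.not_eq_true', decide_eq_false_iff_not, not_or, not_and] at hb
        omega
      have : (PySem.List.insertBy pvBeforeLex x (y :: ys))
          = y :: PySem.List.insertBy pvBeforeLex x ys := by
        simp [PySem.List.insertBy, hb]
      rw [this]
      exact List.Pairwise.cons
        (fun z hz => by
          rcases (PySem.List.mem_insertBy pvBeforeLex x z ys).mp hz with hz | hz
          · subst hz; exact hyx
          · exact List.rel_of_pairwise_cons h hz)
        (ih h.of_cons)

lemma pv_foldl_pairwise (xs : List (Int × Int)) : ∀ acc : List (Int × Int),
    acc.Pairwise (fun u v : Int × Int => u.1 ≤ v.1) →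
    (xs.foldl (fun acc x => PySem.List.insertBy pvBeforeLex x acc) acc).Pairwise
      (fun u v : Int × Int => u.1 ≤ v.1) := by
  induction xs with
  | nil => intro acc h; simpa using h
  | cons x xs ih =>
    intro acc h
    exact ih _ (pv_insertBy_pairwise x acc h)

lemma pv_sorted2_pairwise (xs : List (Int × Int)) :
    (PySem.List.sorted2 xs Prod.fst Prod.snd).Pairwise (fun u v : Int × Int => u.1 ≤ v.1) := by
  have : PySem.List.sorted2 xs Prod.fst Prod.snd
      = xs.foldl (fun acc x => PySem.List.insertBy pvBeforeLex x acc) [] := rfl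
  rw [this]
  exact pv_foldl_pairwise xs [] (by simp)

-- ===== VERDICT (by name: the statement is the Claim_ definition above) =====
theorem size_of_interval_union_spec : Claim_equal_size_of_interval_union := by
  intro intervals _
  unfold Spec_size_of_interval_union size_of_interval_union size_of_interval_union_alt
  have := pv_main (PySem.List.sorted2 intervals Prod.fst Prod.snd) none none 0
    (pv_sorted2_pairwise intervals) (Or.inl rfl)
  simpa using this
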